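-- pv_equiv track=rewrite | github.com/revvevol/sat-solvers | hidoku.py | voisin
-- ===== SOURCE A (Python) =====
-- def voisin(i1, j1, i2, j2):
--     k = []
--     used = []
--     t = (i2,j2)
--
--     k = [(i1, j1-1), (i1, j1+1), (i1-1, j1), (i1-1, j1-1),
--          (i1-1, j1+1), (i1+1, j1), (i1+1, j1-1), (i1+1, j1+1)]
--
--     k = [x for x in k if (x[0] >= 0 and x[1] >= 0) and (x[0] <= 6 and x[1] <= 6) and x not in used]
--
--     if t in k:
--         used.append(t)
--         return True
--     else:
--         return False
-- ===== SOURCE B (Python) =====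
-- def voisin(i1, j1, i2, j2):
--     # closed-form adjacency test: (i2,j2) is an in-bounds king-move neighbor of (i1,j1)
--     return (0 <= i2 <= 6 and 0 <= j2 <= 6
--             and abs(i1 - i2) <= 1 and abs(j1 - j2) <= 1
--             and (i1, j1) != (i2, j2))
-- ===== Notes on version B (the rewrite author's own statement) =====
-- stated objective: simpler
-- what changed: Replaces the 8-candidate list construction, filter and membership test with a closed-form arithmetic adjacency check (Chebyshev distance 1 with bounds on the target cell only).
import Mathlib
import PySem

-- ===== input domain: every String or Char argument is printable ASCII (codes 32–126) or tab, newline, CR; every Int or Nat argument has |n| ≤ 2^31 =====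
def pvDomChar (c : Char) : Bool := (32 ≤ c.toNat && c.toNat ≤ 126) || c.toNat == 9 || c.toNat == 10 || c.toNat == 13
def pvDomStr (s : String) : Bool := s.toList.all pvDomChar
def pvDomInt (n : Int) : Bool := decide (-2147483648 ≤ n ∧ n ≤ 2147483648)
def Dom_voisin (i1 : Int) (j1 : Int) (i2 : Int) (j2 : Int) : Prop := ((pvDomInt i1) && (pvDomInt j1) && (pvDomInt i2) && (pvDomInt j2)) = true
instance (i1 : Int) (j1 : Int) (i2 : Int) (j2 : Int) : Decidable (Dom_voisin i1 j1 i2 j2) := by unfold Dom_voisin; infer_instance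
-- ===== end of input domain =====

-- ===== PORT A =====
-- B changes: closed-form arithmetic adjacency check instead of candidate-list + filter + membership (objective: simpler).
def voisin (i1 : Int) (j1 : Int) (i2 : Int) (j2 : Int) : Bool :=
  let t : Int × Int := (i2, j2)
  let k : List (Int × Int) :=
    [(i1, j1-1), (i1, j1+1), (i1-1, j1), (i1-1, j1-1),
     (i1-1, j1+1), (i1+1, j1), (i1+1, j1-1), (i1+1, j1+1)]
  -- 'used' is always []; 'x not in used' is always true, kept as a trivially-true conjunct
  let k := k.filter (fun x => (x.1 ≥ 0 && x.2 ≥ 0) && (x.1 ≤ 6 && x.2 ≤ 6) && !([] : List (Int × Int)).contains x)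
  if k.contains t then true else false

-- ===== PORT B =====
def voisin_alt (i1 : Int) (j1 : Int) (i2 : Int) (j2 : Int) : Bool :=
  (0 ≤ i2 && i2 ≤ 6) && (0 ≤ j2 && j2 ≤ 6) &&
  (i1 - i2).natAbs ≤ 1 && (j1 - j2).natAbs ≤ 1 &&
  !((i1, j1) == (i2, j2))

-- ===== PRECONDITION & SPEC =====
def Spec_voisin (i1 : Int) (j1 : Int) (i2 : Int) (j2 : Int) (out : Bool) : Prop := out = voisin_alt i1 j1 i2 j2
instance (i1 : Int) (j1 : Int) (i2 : Int) (j2 : Int) (out : Bool) : Decidable (Spec_voisin i1 j1 i2 j2 out) := by unfold Spec_voisin; infer_instance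

-- ===== CLAIM (what is proved, stated in full; the proofs are below) =====
def Claim_equal_voisin : Prop := ∀ (i1 : Int) (j1 : Int) (i2 : Int) (j2 : Int), Dom_voisin i1 j1 i2 j2 → Spec_voisin i1 j1 i2 j2 (voisin i1 j1 i2 j2)

-- ===== LEMMAS AND PROOFS =====
theorem voisin_eq_alt (i1 j1 i2 j2 : Int) : voisin i1 j1 i2 j2 = voisin_alt i1 j1 i2 j2 := by
  have h : (voisin i1 j1 i2 j2 = true) ↔ (voisin_alt i1 j1 i2 j2 = true) := by
    simp [voisin, voisin_alt, List.mem_filter, Prod.ext_iff]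
    omega
  exact Bool.coe_iff_coe.mp h

-- ===== VERDICT (by name: the statement is the Claim_ definition above) =====
theorem voisin_spec : Claim_equal_voisin := by
  intro i1 j1 i2 j2 _
  unfold Spec_voisin
  exact voisin_eq_alt i1 j1 i2 j2
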